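-- pv_equiv track=rewrite | github.com/B-S-Arnold/bugHunt | bugSprAI/fixers/format_fixer2.py | _find_if_block_indent
-- ===== SOURCE A (Python) =====
-- def _find_if_block_indent(previous_lines: list) -> int:
--     """Find the indentation level (in increments of 4) of the matching if statement"""
--     for line in reversed(previous_lines):
--         stripped = line.strip()
--         if stripped:
--             first_word = stripped.split()[0].rstrip(':')  # Remove colon
--             if first_word in ('if', 'elif'):
--                 spaces = len(line) - len(line.lstrip())
--                 return spaces // 4
--     return 0
-- ===== SOURCE B (Python) =====
-- def _find_if_block_indent(previous_lines: list) -> int: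
--     """Pipeline: collect the indents of all if/elif lines, return the last (0 if none)."""
--     indents = [(len(line) - len(line.lstrip())) // 4
--                for line in previous_lines
--                if (line.split() or [''])[0].rstrip(':') in ('if', 'elif')]
--     return indents[-1] if indents else 0
-- ===== Notes on version B (the rewrite author's own statement) =====
-- stated objective: alternative
-- what changed: Replaces A's reversed() scan with early return by a filter/map pipeline over the raw lines (no per-line strip step: the first word of line.split() is used directly) that collects the indents of all if/elif lines and returns the last one, 0 if none.
import Mathlib
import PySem

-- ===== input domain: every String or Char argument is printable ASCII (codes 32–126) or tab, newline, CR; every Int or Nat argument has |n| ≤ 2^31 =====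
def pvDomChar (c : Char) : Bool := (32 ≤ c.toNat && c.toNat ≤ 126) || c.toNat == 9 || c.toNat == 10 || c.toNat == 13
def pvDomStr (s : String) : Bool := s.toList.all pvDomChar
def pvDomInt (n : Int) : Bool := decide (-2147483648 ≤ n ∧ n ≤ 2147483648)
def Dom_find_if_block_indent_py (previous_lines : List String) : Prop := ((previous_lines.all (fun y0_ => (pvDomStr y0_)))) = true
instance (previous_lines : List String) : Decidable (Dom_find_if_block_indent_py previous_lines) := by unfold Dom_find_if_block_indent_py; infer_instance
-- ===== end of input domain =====

-- B replaces A's reversed scan with early return by a filter/map pipeline over the raw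
-- lines (first word of line.split(), no strip) taking the last collected indent.

-- s.rstrip(':') ported by hand: drop trailing ':' characters (exact for every string);
-- both Pythons call .rstrip(':'), so the helper is shared.
def pvRstripColon (s : String) : String :=
  String.ofList ((s.toList.reverse.dropWhile (· == ':')).reverse)

-- ===== PORT A =====
-- the 'for line in reversed(previous_lines)' loop with its early return, as recursion
-- over the reversed list; stripped.split()[0] is the head (stripped is nonempty here,
-- so split() is nonempty and [0] never raises; headD "" is exact on this branch)
def pvFindA : List String → Int
  | [] => 0
  | line :: rest =>
    let stripped := PySem.Str.strip line
    if stripped ≠ "" then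
      let first_word := pvRstripColon ((PySem.Str.split₀ stripped).headD "")
      if first_word = "if" ∨ first_word = "elif" then
        PySem.Int.floordiv (PySem.Str.len line - PySem.Str.len (PySem.Str.lstrip line)) 4
      else pvFindA rest
    else pvFindA rest

def find_if_block_indent_py (previous_lines : List String) : Int :=
  pvFindA previous_lines.reverse

-- ===== PORT B =====
-- the comprehension's filter clause: (line.split() or [''])[0].rstrip(':') in ('if','elif')
def pvIsIfLine (line : String) : Bool :=
  let fw := pvRstripColon ((PySem.Str.split₀ line).headD "")
  fw == "if" || fw == "elif"

-- the comprehension's value: (len(line) - len(line.lstrip())) // 4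
def pvIndent (line : String) : Int :=
  PySem.Int.floordiv (PySem.Str.len line - PySem.Str.len (PySem.Str.lstrip line)) 4

-- indents[-1] if indents else 0
def find_if_block_indent_py_alt (previous_lines : List String) : Int :=
  ((previous_lines.filter pvIsIfLine).map pvIndent).getLastD 0

-- ===== PRECONDITION & SPEC =====
def Spec_find_if_block_indent_py (previous_lines : List String) (out : Int) : Prop := out = find_if_block_indent_py_alt previous_lines
instance (previous_lines : List String) (out : Int) : Decidable (Spec_find_if_block_indent_py previous_lines out) := by unfold Spec_find_if_block_indent_py; infer_instance

-- ===== CLAIM (what is proved, stated in full; the proofs are below) =====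
def Claim_equal_find_if_block_indent_py : Prop := ∀ (previous_lines : List String), Dom_find_if_block_indent_py previous_lines → Spec_find_if_block_indent_py previous_lines (find_if_block_indent_py previous_lines)

-- ===== LEMMAS AND PROOFS =====
-- split() ignores whitespace, so stripping first does not change it: split₀ ∘ strip = split₀.
theorem pvGo_space (ws : List Char) (h : ∀ c ∈ ws, PySem.Chars.isspace c = true)
    (cur : List Char) (accs : List (List Char)) :
    PySem.Chars.split₀.go ws cur accs = PySem.Chars.split₀.go [] cur accs := by
  induction ws generalizing cur accs with
  | nil => rfl
  | cons c rest ih =>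
    have hc : PySem.Chars.isspace c = true := h c (by simp)
    have ih' := fun cur accs => ih (fun d hd => h d (by simp [hd])) cur accs
    simp only [PySem.Chars.split₀.go, hc, if_true]
    by_cases hcur : cur.isEmpty
    · obtain rfl : cur = [] := List.isEmpty_iff.mp hcur
      simp only [hcur, if_true, ih']
      simp [PySem.Chars.split₀.go]
    · simp only [hcur, ih']
      simp only [PySem.Chars.split₀.go, List.isEmpty_nil, if_true]

theorem pvGo_append_space (cs ws : List Char) (h : ∀ c ∈ ws, PySem.Chars.isspace c = true)
    (cur : List Char) (accs : List (List Char)) :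
    PySem.Chars.split₀.go (cs ++ ws) cur accs = PySem.Chars.split₀.go cs cur accs := by
  induction cs generalizing cur accs with
  | nil => simpa using pvGo_space ws h cur accs
  | cons c rest ih =>
    simp only [List.cons_append, PySem.Chars.split₀.go]
    by_cases hc : PySem.Chars.isspace c <;> simp only [hc, if_true] <;>
      [skip; exact ih _ _]
    by_cases hcur : cur.isEmpty <;> simp only [hcur, if_true] <;> exact ih _ _

theorem pvSplit₀_lstrip (cs : List Char) :
    PySem.Chars.split₀ (PySem.Chars.lstrip cs) = PySem.Chars.split₀ cs := by
  unfold PySem.Chars.split₀ PySem.Chars.lstrip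
  induction cs with
  | nil => rfl
  | cons c rest ih =>
    by_cases hc : PySem.Chars.isspace c
    · rw [List.dropWhile_cons_of_pos hc]
      rw [ih]
      simp only [PySem.Chars.split₀.go, hc, if_true, List.isEmpty_nil, if_true]
    · rw [List.dropWhile_cons_of_neg (by simp [hc])]

theorem pvSplit₀_rstrip (ds : List Char) :
    PySem.Chars.split₀ (PySem.Chars.rstrip ds) = PySem.Chars.split₀ ds := by
  unfold PySem.Chars.rstrip
  conv_rhs => rw [show ds = (ds.reverse.dropWhile PySem.Chars.isspace).reverse ++ (ds.reverse.takeWhile PySem.Chars.isspace).reverse by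
    rw [← List.reverse_append, List.takeWhile_append_dropWhile, List.reverse_reverse]]
  unfold PySem.Chars.split₀
  rw [pvGo_append_space]
  intro c hc
  exact List.mem_takeWhile_imp (List.mem_reverse.mp hc)

theorem pvSplit₀_strip (cs : List Char) :
    PySem.Chars.split₀ (PySem.Chars.strip cs) = PySem.Chars.split₀ cs := by
  unfold PySem.Chars.strip
  rw [pvSplit₀_rstrip, pvSplit₀_lstrip]

theorem pvStrSplit₀_strip (s : String) :
    PySem.Str.split₀ (PySem.Str.strip s) = PySem.Str.split₀ s := by
  unfold PySem.Str.split₀ PySem.Str.strip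
  rw [String.toList_ofList, pvSplit₀_strip]

-- per-line bridge + main induction: A's reversed scan with early return = first hit of
-- the reversed filtered list = last hit of the filtered list.
theorem pvFindA_eq (xs : List String) :
    pvFindA xs = ((xs.filter pvIsIfLine).map pvIndent).headD 0 := by
  induction xs with
  | nil => rfl
  | cons line rest ih =>
    have hfw : PySem.Str.split₀ (PySem.Str.strip line) = PySem.Str.split₀ line :=
      pvStrSplit₀_strip line
    by_cases hs : PySem.Str.strip line = ""
    · have hsp : PySem.Str.split₀ line = [] := by rw [← hfw, hs]; rfl
      have hB : pvIsIfLine line = false := by simp [pvIsIfLine, hsp]; decide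
      simp only [pvFindA, hs, ne_eq, not_true_eq_false, if_false, List.filter_cons, hB,
        Bool.false_eq_true, if_false, ih]
    · have hfw' : pvRstripColon ((PySem.Str.split₀ (PySem.Str.strip line)).headD "")
          = pvRstripColon ((PySem.Str.split₀ line).headD "") := by rw [hfw]
      by_cases hw : pvRstripColon ((PySem.Str.split₀ line).headD "") = "if"
          ∨ pvRstripColon ((PySem.Str.split₀ line).headD "") = "elif"
      · have hB : pvIsIfLine line = true := by
          simp only [pvIsIfLine, Bool.or_eq_true, beq_iff_eq]; exact hw
        simp only [pvFindA, hs, ne_eq, not_false_iff, if_true, hfw', hw, if_true,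
          List.filter_cons, hB, if_true, List.map_cons, List.headD_cons]
        rfl
      · have hB : pvIsIfLine line = false := by
          simp only [pvIsIfLine, Bool.or_eq_false_iff, beq_eq_false_iff_ne]
          exact ⟨fun h => hw (Or.inl h), fun h => hw (Or.inr h)⟩
        simp only [pvFindA, hs, ne_eq, not_false_iff, if_true, hfw', hw, if_false,
          List.filter_cons, hB, Bool.false_eq_true, if_false, ih]

-- ===== VERDICT (by name: the statement is the Claim_ definition above) =====
theorem find_if_block_indent_py_spec : Claim_equal_find_if_block_indent_py := by
  intro l _
  show find_if_block_indent_py l = find_if_block_indent_py_alt l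
  rw [find_if_block_indent_py, find_if_block_indent_py_alt, pvFindA_eq,
    List.filter_reverse, List.map_reverse, List.getLastD_eq_getLast?,
    ← List.head?_reverse]
  exact List.headD_eq_head?_getD
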